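-- pv_equiv track=rewrite | github.com/sada-narayanappa/Notebooks | DisplayUtils.py | formatContent
-- ===== SOURCE A (Python) =====
-- def formatContent(c):
--     c1 = str(c).lower().strip()
--     g=[k.lower().strip() for k in "complete, finished, success, Yes".split(",") ]
--     r=[k.lower().strip() for k in "error, err, failed, no".split(",") ]
--     y=[k.lower().strip() for k in "pending, ongoing, current".split(",") ]
--     s = ""
--     if (c1 in g):
--          s = "bgcolor=lightgreen";
--     elif (c1 in r):
--          s = "bgcolor=#FFAEAE";
--     elif (c1 in y):
--          s = "bgcolor=lightyellow";
--
--     return "<td " + s + ">" + str(c) + "</td>"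
-- ===== SOURCE B (Python) =====
-- _KEYS = ["complete", "finished", "success", "yes",
--          "error", "err", "failed", "no",
--          "pending", "ongoing", "current"]
--
-- def formatContent(c):
--     try:
--         i = _KEYS.index(str(c).lower().strip())
--         s = "bgcolor=" + ("lightgreen" if i < 4 else "#FFAEAE" if i < 8 else "lightyellow")
--     except ValueError:
--         s = ""
--     return "<td " + s + ">" + str(c) + "</td>"
-- ===== Notes on version B (the rewrite author's own statement) =====
-- stated objective: alternative
-- what changed: Instead of A's three runtime-built keyword lists tested by an if/elif membership chain, B does one .index scan over a single flat keyword list and derives the color arithmetically from the position (i<4 green, i<8 red, else yellow), with ValueError meaning no color.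
import Mathlib
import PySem

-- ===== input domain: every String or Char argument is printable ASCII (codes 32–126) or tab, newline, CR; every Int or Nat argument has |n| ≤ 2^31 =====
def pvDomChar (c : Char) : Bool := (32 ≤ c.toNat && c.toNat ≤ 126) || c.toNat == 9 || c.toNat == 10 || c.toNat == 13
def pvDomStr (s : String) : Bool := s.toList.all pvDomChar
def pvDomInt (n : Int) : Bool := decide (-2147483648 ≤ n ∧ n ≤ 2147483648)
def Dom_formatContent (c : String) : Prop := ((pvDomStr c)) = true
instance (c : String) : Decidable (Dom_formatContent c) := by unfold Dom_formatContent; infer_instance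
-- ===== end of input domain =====

-- B replaces A's three runtime-built keyword lists and if/elif membership chain by one
-- positional scan of a flat keyword list, deriving the color from the index by thresholds
-- (objective: alternative).

-- ===== PORT A =====
def formatContent (c : String) : String :=
  let c1 := PySem.Str.strip (PySem.Str.lower c)
  let g := ((PySem.Str.split? "complete, finished, success, Yes" ",").getD []).map
            (fun k => PySem.Str.strip (PySem.Str.lower k))
  let r := ((PySem.Str.split? "error, err, failed, no" ",").getD []).map
            (fun k => PySem.Str.strip (PySem.Str.lower k))
  let y := ((PySem.Str.split? "pending, ongoing, current" ",").getD []).map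
            (fun k => PySem.Str.strip (PySem.Str.lower k))
  let s := if c1 ∈ g then "bgcolor=lightgreen"
           else if c1 ∈ r then "bgcolor=#FFAEAE"
           else if c1 ∈ y then "bgcolor=lightyellow"
           else ""
  "<td " ++ s ++ ">" ++ c ++ "</td>"

-- ===== PORT B =====
def pvKeys : List String :=
  ["complete", "finished", "success", "yes",
   "error", "err", "failed", "no",
   "pending", "ongoing", "current"]

def formatContent_alt (c : String) : String :=
  let s := match PySem.List.index? pvKeys (PySem.Str.strip (PySem.Str.lower c)) with
    | some i => "bgcolor=" ++ (if i < 4 then "lightgreen" else if i < 8 then "#FFAEAE" else "lightyellow")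
    | none => ""
  "<td " ++ s ++ ">" ++ c ++ "</td>"

-- ===== PRECONDITION & SPEC =====
def Spec_formatContent (c : String) (out : String) : Prop := out = formatContent_alt c
instance (c : String) (out : String) : Decidable (Spec_formatContent c out) := by unfold Spec_formatContent; infer_instance

-- ===== CLAIM =====
def Claim_equal_formatContent : Prop := ∀ (c : String), Dom_formatContent c → Spec_formatContent c (formatContent c)

-- ===== LEMMAS AND PROOFS =====
lemma pv_g_eq : ((PySem.Str.split? "complete, finished, success, Yes" ",").getD []).map
    (fun k => PySem.Str.strip (PySem.Str.lower k)) = ["complete", "finished", "success", "yes"] := by decide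
lemma pv_r_eq : ((PySem.Str.split? "error, err, failed, no" ",").getD []).map
    (fun k => PySem.Str.strip (PySem.Str.lower k)) = ["error", "err", "failed", "no"] := by decide
lemma pv_y_eq : ((PySem.Str.split? "pending, ongoing, current" ",").getD []).map
    (fun k => PySem.Str.strip (PySem.Str.lower k)) = ["pending", "ongoing", "current"] := by decide

/-- Core: the if/elif membership chain of A equals B's index-threshold dispatch, for any key. -/
lemma pv_core (c1 : String) :
    (if c1 ∈ ["complete", "finished", "success", "yes"] then "bgcolor=lightgreen"
     else if c1 ∈ ["error", "err", "failed", "no"] then "bgcolor=#FFAEAE"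
     else if c1 ∈ ["pending", "ongoing", "current"] then "bgcolor=lightyellow"
     else "") =
    (match PySem.List.index? pvKeys c1 with
     | some i => "bgcolor=" ++ (if i < 4 then "lightgreen" else if i < 8 then "#FFAEAE" else "lightyellow")
     | none => "") := by
  by_cases h1 : c1 = "complete"; · subst h1; decide
  by_cases h2 : c1 = "finished"; · subst h2; decide
  by_cases h3 : c1 = "success"; · subst h3; decide
  by_cases h4 : c1 = "yes"; · subst h4; decide
  by_cases h5 : c1 = "error"; · subst h5; decide
  by_cases h6 : c1 = "err"; · subst h6; decide
  by_cases h7 : c1 = "failed"; · subst h7; decide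
  by_cases h8 : c1 = "no"; · subst h8; decide
  by_cases h9 : c1 = "pending"; · subst h9; decide
  by_cases h10 : c1 = "ongoing"; · subst h10; decide
  by_cases h11 : c1 = "current"; · subst h11; decide
  have hnone : PySem.List.index? pvKeys c1 = none := by
    rw [PySem.List.index?_eq_none_iff]
    simp [pvKeys, h1, h2, h3, h4, h5, h6, h7, h8, h9, h10, h11]
  rw [hnone]
  simp [h1, h2, h3, h4, h5, h6, h7, h8, h9, h10, h11]

-- ===== VERDICT =====
theorem formatContent_spec : Claim_equal_formatContent := by
  intro c _
  unfold Spec_formatContent formatContent formatContent_alt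
  simp only [pv_g_eq, pv_r_eq, pv_y_eq]
  rw [pv_core]
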